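-- pv_equiv track=rewrite | github.com/thrinathadevops/VERTEX | ai-interview-app/backend/proctor_agent.py | _check_ai_browser_tab
-- ===== SOURCE A (Python) =====
-- def _check_ai_browser_tab(window_title: str) -> bool:
--     """Check if the browser window title suggests an AI service."""
--     ai_title_patterns = [
--         "chatgpt", "chat.openai", "claude", "anthropic",
--         "gemini", "bard", "copilot", "perplexity",
--         "phind", "you.com", "huggingface", "cohere",
--         "mistral", "groq", "poe.com", "deepseek",
--     ]
--     lower_title = window_title.lower()
--     return any(p in lower_title for p in ai_title_patterns)
-- ===== SOURCE B (Python) =====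
-- def _check_ai_browser_tab(window_title: str) -> bool:
--     """Check if the browser window title suggests an AI service.
--
--     Single left-to-right scan: at each position of the lowercased title,
--     test whether any pattern starts there (instead of k independent
--     substring searches over the whole title).
--     """
--     ai_title_patterns = [
--         "chatgpt", "chat.openai", "claude", "anthropic",
--         "gemini", "bard", "copilot", "perplexity",
--         "phind", "you.com", "huggingface", "cohere",
--         "mistral", "groq", "poe.com", "deepseek",
--     ]
--     t = window_title.lower()
--     return any(
--         t.startswith(p, i)
--         for i in range(len(t))
--         for p in ai_title_patterns
--     )
-- ===== Notes on version B (the rewrite author's own statement) =====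
-- stated objective: alternative
-- what changed: Replaces 16 independent whole-title substring searches with one left-to-right scan of the lowercased title that tests at each position whether any pattern starts there.
import Mathlib
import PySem

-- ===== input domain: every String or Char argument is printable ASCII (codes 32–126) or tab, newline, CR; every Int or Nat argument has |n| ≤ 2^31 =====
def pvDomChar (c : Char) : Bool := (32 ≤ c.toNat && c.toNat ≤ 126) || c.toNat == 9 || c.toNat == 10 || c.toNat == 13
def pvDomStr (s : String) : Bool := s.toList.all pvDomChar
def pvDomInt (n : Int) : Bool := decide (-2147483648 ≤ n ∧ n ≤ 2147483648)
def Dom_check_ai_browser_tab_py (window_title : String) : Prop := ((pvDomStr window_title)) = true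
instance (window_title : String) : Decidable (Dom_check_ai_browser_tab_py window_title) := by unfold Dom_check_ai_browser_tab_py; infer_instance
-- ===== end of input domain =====

-- B replaces 16 independent whole-title substring searches by one left-to-right scan
-- testing at each position whether any pattern starts there (alternative, same cost).

def aiTitlePatterns : List String :=
  ["chatgpt", "chat.openai", "claude", "anthropic",
   "gemini", "bard", "copilot", "perplexity",
   "phind", "you.com", "huggingface", "cohere",
   "mistral", "groq", "poe.com", "deepseek"]

-- ===== PORT A =====
-- lower_title = window_title.lower(); any(p in lower_title for p in patterns)
def check_ai_browser_tab_py (window_title : String) : Bool :=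
  let lower_title := PySem.Str.lower window_title
  aiTitlePatterns.any (fun p => PySem.Str.isIn p lower_title)

-- ===== PORT B =====
-- t = window_title.lower(); any(t.startswith(p, i) for i in range(len(t)) for p in patterns)
-- t.startswith(p, i) with 0 ≤ i < len(t) is exactly p.toList.isPrefixOf (t.toList.drop i)
def check_ai_browser_tab_py_alt (window_title : String) : Bool :=
  let t := (PySem.Str.lower window_title).toList
  (List.range t.length).any (fun i =>
    aiTitlePatterns.any (fun p => p.toList.isPrefixOf (t.drop i)))

-- ===== PRECONDITION & SPEC =====
def Spec_check_ai_browser_tab_py (window_title : String) (out : Bool) : Prop := out = check_ai_browser_tab_py_alt window_title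
instance (window_title : String) (out : Bool) : Decidable (Spec_check_ai_browser_tab_py window_title out) := by unfold Spec_check_ai_browser_tab_py; infer_instance

-- ===== CLAIM (what is proved, stated in full; the proofs are below) =====
def Claim_equal_check_ai_browser_tab_py : Prop := ∀ (window_title : String), Dom_check_ai_browser_tab_py window_title → Spec_check_ai_browser_tab_py window_title (check_ai_browser_tab_py window_title)

-- ===== LEMMAS AND PROOFS =====

-- a nonempty substring occurs in l iff it is a prefix of some drop at a position < length
theorem infix_iff_exists_prefix_drop (sub l : List Char) (h : sub ≠ []) :
    sub <:+: l ↔ ∃ i < l.length, sub <+: l.drop i := by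
  constructor
  · rintro ⟨s, t, rfl⟩
    refine ⟨s.length, ?_, ?_⟩
    · have : sub.length ≠ 0 := by simpa using h
      simp [List.length_append]; omega
    · rw [List.append_assoc, List.drop_left]
      exact ⟨t, rfl⟩
  · rintro ⟨i, hi, r, hr⟩
    exact ⟨l.take i, r, by rw [List.append_assoc, hr, List.take_append_drop]⟩

theorem any_isIn_eq_scan (pats : List String) (s : String)
    (h : ∀ p ∈ pats, p.toList ≠ []) :
    pats.any (fun p => PySem.Str.isIn p s) =
    (List.range s.toList.length).any (fun i =>
      pats.any (fun p => p.toList.isPrefixOf (s.toList.drop i))) := by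
  rw [Bool.eq_iff_iff]
  simp only [List.any_eq_true, List.mem_range, PySem.Str.isIn_iff_infix,
    List.isPrefixOf_iff_prefix]
  constructor
  · rintro ⟨p, hp, hinf⟩
    obtain ⟨i, hi, hpre⟩ := (infix_iff_exists_prefix_drop _ _ (h p hp)).1 hinf
    exact ⟨i, hi, p, hp, hpre⟩
  · rintro ⟨i, hi, p, hp, hpre⟩
    exact ⟨p, hp, (infix_iff_exists_prefix_drop _ _ (h p hp)).2 ⟨i, hi, hpre⟩⟩

-- ===== VERDICT (by name: the statement is the Claim_ definition above) =====
theorem check_ai_browser_tab_py_spec : Claim_equal_check_ai_browser_tab_py := by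
  intro w _
  unfold Spec_check_ai_browser_tab_py check_ai_browser_tab_py check_ai_browser_tab_py_alt
  exact any_isIn_eq_scan aiTitlePatterns (PySem.Str.lower w) (by decide)
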